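-- pv_equiv track=rewrite | github.com/mr-fuzzypants/nodegraph | python/core/errors/generate_errors.py | generate_python_module
-- ===== SOURCE A (Python) =====
-- def generate_python_module(module_name: str, errors: dict) -> str:
--     enum_name = f"{module_name.capitalize()}ErrorCode"
--     message_var = f"{module_name.upper()}_MESSAGES"
--     id_var = f"{module_name.upper()}_ERROR_IDS"
--
--     lines = []
--     lines.append("from enum import Enum\n")
--
--     # Enum
--     lines.append(f"class {enum_name}(str, Enum):")
--     for error_name in errors:
--         code = f"{module_name}.{error_name}"
--         lines.append(
--             f"    {error_name.upper()} = \"{code}\""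
--         )
--
--     lines.append("\n")
--
--     # Messages dict
--     lines.append(f"{message_var} = {{")
--     for error_name, data in errors.items():
--         lines.append(
--             f"    {enum_name}.{error_name.upper()}: "
--             f"\"{data['message']}\","
--         )
--     lines.append("}\n")
--
--     # ID dict
--     lines.append(f"{id_var} = {{")
--     for error_name, data in errors.items():
--         lines.append(
--             f"    {enum_name}.{error_name.upper()}: "
--             f"\"{data['id']}\","
--         )
--     lines.append("}\n")
--
--     return "\n".join(lines)
-- ===== SOURCE B (Python) =====
-- def generate_python_module(module_name: str, errors: dict) -> str:
--     enum_name = f"{module_name.capitalize()}ErrorCode"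
--
--     # ONE recursive pass over the entries, producing the three line groups
--     # (enum members, message entries, id entries) simultaneously.
--     def walk(items):
--         if not items:
--             return [], [], []
--         (name, data) = items[0]
--         e, ms, ids = walk(items[1:])
--         u = name.upper()
--         return ([f'    {u} = "{module_name}.{name}"'] + e,
--                 [f'    {enum_name}.{u}: "{data["message"]}",'] + ms,
--                 [f'    {enum_name}.{u}: "{data["id"]}",'] + ids)
--
--     e, ms, ids = walk(list(errors.items()))
--     lines = (["from enum import Enum\n", f"class {enum_name}(str, Enum):"]
--              + e
--              + ["\n", f"{module_name.upper()}_MESSAGES = {{"]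
--              + ms
--              + ["}\n", f"{module_name.upper()}_ERROR_IDS = {{"]
--              + ids
--              + ["}\n"])
--     return "\n".join(lines)
-- ===== Notes on version B (the rewrite author's own statement) =====
-- stated objective: alternative
-- what changed: B replaces A's three separate iterative loops over the dict with ONE recursive traversal of the entries that returns the three line groups (enum members, message entries, id entries) as a triple in a single pass, then splices them into the fixed skeleton.
import Mathlib
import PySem

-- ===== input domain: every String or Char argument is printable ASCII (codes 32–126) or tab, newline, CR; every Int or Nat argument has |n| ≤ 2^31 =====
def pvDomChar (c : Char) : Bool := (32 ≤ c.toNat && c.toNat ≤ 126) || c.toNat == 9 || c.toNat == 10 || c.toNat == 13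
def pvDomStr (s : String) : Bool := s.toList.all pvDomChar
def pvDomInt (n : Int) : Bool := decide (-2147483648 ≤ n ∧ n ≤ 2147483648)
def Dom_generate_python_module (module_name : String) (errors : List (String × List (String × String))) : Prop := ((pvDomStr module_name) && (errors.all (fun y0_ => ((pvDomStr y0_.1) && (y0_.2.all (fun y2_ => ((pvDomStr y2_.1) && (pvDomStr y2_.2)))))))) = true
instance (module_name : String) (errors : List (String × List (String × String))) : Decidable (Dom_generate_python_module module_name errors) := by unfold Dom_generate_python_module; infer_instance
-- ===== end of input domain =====

-- B builds the three line groups (enum members, message entries, id entries) in ONE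
-- recursive pass over the entries, instead of A's three separate loops; equal output.

-- ===== PORT A =====

-- Python str.capitalize(): first char uppercased, the rest lowercased (exact on the ASCII domain).
def pyCapitalize (cs : List Char) : List Char :=
  match cs with
  | [] => []
  | c :: rest => PySem.Chars.upperChar c :: PySem.Chars.lower rest

-- data['message'] / data['id']: first match in the association list (KeyError = none, excluded by Pre_).
def pyGetKey (data : List (String × String)) (k : String) : List Char :=
  ((data.lookup k).getD "").toList

def generate_python_module (module_name : String) (errors : List (String × List (String × String))) : String :=
  let m := module_name.toList
  let enum_name := pyCapitalize m ++ "ErrorCode".toList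
  let message_var := PySem.Chars.upper m ++ "_MESSAGES".toList
  let id_var := PySem.Chars.upper m ++ "_ERROR_IDS".toList
  let lines : List (List Char) := []
  let lines := lines ++ ["from enum import Enum\n".toList]
  -- Enum
  let lines := lines ++ ["class ".toList ++ enum_name ++ "(str, Enum):".toList]
  let lines := errors.foldl (fun ls p =>
    ls ++ ["    ".toList ++ PySem.Chars.upper p.1.toList ++ " = \"".toList
            ++ (m ++ ".".toList ++ p.1.toList) ++ "\"".toList]) lines
  let lines := lines ++ ["\n".toList]
  -- Messages dict
  let lines := lines ++ [message_var ++ " = {".toList]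
  let lines := errors.foldl (fun ls p =>
    ls ++ ["    ".toList ++ enum_name ++ ".".toList ++ PySem.Chars.upper p.1.toList
            ++ ": \"".toList ++ pyGetKey p.2 "message" ++ "\",".toList]) lines
  let lines := lines ++ ["}\n".toList]
  -- ID dict
  let lines := lines ++ [id_var ++ " = {".toList]
  let lines := errors.foldl (fun ls p =>
    ls ++ ["    ".toList ++ enum_name ++ ".".toList ++ PySem.Chars.upper p.1.toList
            ++ ": \"".toList ++ pyGetKey p.2 "id" ++ "\",".toList]) lines
  let lines := lines ++ ["}\n".toList]
  String.ofList (PySem.Chars.join "\n".toList lines)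

-- ===== PORT B =====

-- B's single recursive pass: returns (enum member lines, message lines, id lines).
def pvWalk (m enum_name : List Char) :
    List (String × List (String × String)) →
      List (List Char) × List (List Char) × List (List Char)
  | [] => ([], [], [])
  | (name, data) :: rest =>
    let r := pvWalk m enum_name rest
    let u := PySem.Chars.upper name.toList
    (("    ".toList ++ u ++ " = \"".toList ++ m ++ ".".toList ++ name.toList ++ "\"".toList) :: r.1,
     ("    ".toList ++ enum_name ++ ".".toList ++ u ++ ": \"".toList ++ pyGetKey data "message" ++ "\",".toList) :: r.2.1,
     ("    ".toList ++ enum_name ++ ".".toList ++ u ++ ": \"".toList ++ pyGetKey data "id" ++ "\",".toList) :: r.2.2)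

def generate_python_module_alt (module_name : String) (errors : List (String × List (String × String))) : String :=
  let m := module_name.toList
  let enum_name := pyCapitalize m ++ "ErrorCode".toList
  let r := pvWalk m enum_name errors
  let lines :=
    ["from enum import Enum\n".toList,
     "class ".toList ++ enum_name ++ "(str, Enum):".toList]
    ++ r.1
    ++ ["\n".toList, PySem.Chars.upper m ++ "_MESSAGES".toList ++ " = {".toList]
    ++ r.2.1
    ++ ["}\n".toList, PySem.Chars.upper m ++ "_ERROR_IDS".toList ++ " = {".toList]
    ++ r.2.2
    ++ ["}\n".toList]
  String.ofList (PySem.Chars.join "\n".toList lines)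

-- ===== PRECONDITION & SPEC =====
-- Pre_ excludes exactly the inputs where some error entry lacks a 'message' or 'id' key: there A raises KeyError.
def Pre_generate_python_module (module_name : String) (errors : List (String × List (String × String))) : Prop :=
  ∀ p ∈ errors, (p.2.lookup "message").isSome ∧ (p.2.lookup "id").isSome
instance (module_name : String) (errors : List (String × List (String × String))) : Decidable (Pre_generate_python_module module_name errors) := by unfold Pre_generate_python_module; infer_instance

def pvWitness_generate_python_module : String × (List (String × List (String × String))) :=
  ("net", [("bad", [("message", "oops"), ("id", "E1")])])

def Spec_generate_python_module (module_name : String) (errors : List (String × List (String × String))) (out : String) : Prop := out = generate_python_module_alt module_name errors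
instance (module_name : String) (errors : List (String × List (String × String))) (out : String) : Decidable (Spec_generate_python_module module_name errors out) := by unfold Spec_generate_python_module; infer_instance

-- ===== CLAIM (what is proved, stated in full; the proofs are below) =====
def Claim_equal_generate_python_module : Prop := ∀ (module_name : String) (errors : List (String × List (String × String))), Dom_generate_python_module module_name errors → Pre_generate_python_module module_name errors → Spec_generate_python_module module_name errors (generate_python_module module_name errors)

-- ===== LEMMAS AND PROOFS =====

-- B's single pass produces exactly the three per-entry maps A's three loops produce.
theorem pvWalk_eq_maps (m en : List Char) (errors : List (String × List (String × String))) :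
    pvWalk m en errors =
      (errors.map (fun p => "    ".toList ++ PySem.Chars.upper p.1.toList ++ " = \"".toList
          ++ m ++ ".".toList ++ p.1.toList ++ "\"".toList),
       errors.map (fun p => "    ".toList ++ en ++ ".".toList ++ PySem.Chars.upper p.1.toList
          ++ ": \"".toList ++ pyGetKey p.2 "message" ++ "\",".toList),
       errors.map (fun p => "    ".toList ++ en ++ ".".toList ++ PySem.Chars.upper p.1.toList
          ++ ": \"".toList ++ pyGetKey p.2 "id" ++ "\",".toList)) := by
  induction errors with
  | nil => rfl
  | cons p rest ih => cases p; simp [pvWalk, ih]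

theorem generate_python_module_eq (module_name : String)
    (errors : List (String × List (String × String))) :
    generate_python_module module_name errors =
      generate_python_module_alt module_name errors := by
  unfold generate_python_module generate_python_module_alt
  simp only [PySem.List.foldl_append_singleton_eq_map, pvWalk_eq_maps,
    List.nil_append, List.append_assoc, List.cons_append]

-- ===== VERDICT (by name: the statement is the Claim_ definition above) =====
theorem generate_python_module_spec : Claim_equal_generate_python_module := by
  intro module_name errors _ _
  exact generate_python_module_eq module_name errors
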